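-- pv_equiv track=rewrite | github.com/compat-project/QCG-PilotJob | components/core/qcg/pilotjob/environment.py | _merge_per_node_spec
-- ===== SOURCE A (Python) =====
-- def _merge_per_node_spec(str_list):
--     prev_value = None
--     result = []
--     times = 1
--
--     for elem in str_list.split(','):
--         if prev_value is not None:
--             if prev_value == elem:
--                 times += 1
--             else:
--                 if times > 1:
--                     result.append("%s(x%d)" % (prev_value, times))
--                 else:
--                     result.append(prev_value)
--
--                 prev_value = elem
--                 times = 1
--         else:
--             prev_value = elem
--             times = 1
--
--     if prev_value is not None:
--         if times > 1:
--             result.append("%s(x%d)" % (prev_value, times))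
--         else:
--             result.append(prev_value)
--
--     return ','.join([str(el) for el in result])
-- ===== SOURCE B (Python) =====
-- def _merge_per_node_spec(str_list):
--     parts = str_list.split(',')
--     # staged passes: (1) boundary indices where a new run starts, (2) zip adjacent
--     # boundaries to obtain each run's start index and length by index arithmetic
--     bounds = [i for i in range(len(parts)) if i == 0 or parts[i] != parts[i - 1]]
--     bounds.append(len(parts))
--     pieces = []
--     for start, end in zip(bounds, bounds[1:]):
--         n = end - start
--         pieces.append("%s(x%d)" % (parts[start], n) if n > 1 else parts[start])
--     return ','.join(pieces)
-- ===== Notes on version B (the rewrite author's own statement) =====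
-- stated objective: alternative
-- what changed: Instead of A's streaming prev_value/times accumulator with duplicated flush logic, B first computes the list of run-boundary indices of the split list, then zips adjacent boundaries and derives each run's key and length by index arithmetic.
import Mathlib
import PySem

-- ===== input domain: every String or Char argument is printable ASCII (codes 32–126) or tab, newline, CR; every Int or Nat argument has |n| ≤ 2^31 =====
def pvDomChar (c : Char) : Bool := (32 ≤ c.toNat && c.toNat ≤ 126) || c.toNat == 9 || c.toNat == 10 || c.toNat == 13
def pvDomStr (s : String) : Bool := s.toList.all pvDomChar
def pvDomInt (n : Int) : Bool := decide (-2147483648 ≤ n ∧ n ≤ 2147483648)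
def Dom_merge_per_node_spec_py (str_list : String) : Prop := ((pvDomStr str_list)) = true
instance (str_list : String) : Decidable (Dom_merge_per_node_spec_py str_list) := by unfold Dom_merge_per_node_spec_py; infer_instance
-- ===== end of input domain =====

-- B replaces A's streaming prev_value/times accumulator by two staged passes:
-- run-boundary indices, then zipping adjacent boundaries (index arithmetic); same O(n) cost.

-- ===== PORT A =====
-- loop body of A: state = (prev_value, result, times); branch order as in the Python
def pvStepA (s : Option String × List String × Int) (elem : String) :
    Option String × List String × Int :=
  match s with
  | (some prev, result, times) =>
      if prev = elem then (some prev, result, times + 1)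
      else (some elem,
            result ++ [if times > 1 then prev ++ "(x" ++ PySem.Int.toStr times ++ ")" else prev],
            (1 : Int))
  | (none, result, _) => (some elem, result, (1 : Int))

-- the final 'if prev_value is not None' flush of A
def pvFlushA (s : Option String × List String × Int) : List String :=
  match s with
  | (some prev, result, times) =>
      result ++ [if times > 1 then prev ++ "(x" ++ PySem.Int.toStr times ++ ")" else prev]
  | (none, result, _) => result

def merge_per_node_spec_py (str_list : String) : String :=
  let parts := (PySem.Str.split? str_list ",").getD []
  PySem.Str.join "," (pvFlushA (parts.foldl pvStepA (none, [], 1)))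

-- ===== PORT B =====
-- Python's parts[i] / parts[start] are always in range here; getD "" is exact for in-range access
def pvPieceB (parts : List String) (q : Nat × Nat) : String :=
  if ((q.2 : Int) - (q.1 : Int)) > 1 then
    parts.getD q.1 "" ++ "(x" ++ PySem.Int.toStr ((q.2 : Int) - (q.1 : Int)) ++ ")"
  else parts.getD q.1 ""

def merge_per_node_spec_py_alt (str_list : String) : String :=
  let parts := (PySem.Str.split? str_list ",").getD []
  let bounds := ((List.range parts.length).filter
      (fun i => i == 0 || parts.getD i "" != parts.getD (i - 1) "")) ++ [parts.length]
  PySem.Str.join "," ((bounds.zip bounds.tail).map (pvPieceB parts))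

-- ===== PRECONDITION & SPEC =====
def Spec_merge_per_node_spec_py (str_list : String) (out : String) : Prop := out = merge_per_node_spec_py_alt str_list
instance (str_list : String) (out : String) : Decidable (Spec_merge_per_node_spec_py str_list out) := by unfold Spec_merge_per_node_spec_py; infer_instance

-- ===== CLAIM =====
def Claim_equal_merge_per_node_spec_py : Prop := ∀ (str_list : String), Dom_merge_per_node_spec_py str_list → Spec_merge_per_node_spec_py str_list (merge_per_node_spec_py str_list)

-- ===== LEMMAS AND PROOFS =====
-- runs of equal consecutive elements (proof-side common shape)
def pvRunsAux (key : String) (n : Int) : List String → List (String × Int)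
  | [] => [(key, n)]
  | x :: xs => if x = key then pvRunsAux key (n + 1) xs else (key, n) :: pvRunsAux x 1 xs

def pvG (kn : String × Int) : String :=
  if kn.2 > 1 then kn.1 ++ "(x" ++ PySem.Int.toStr kn.2 ++ ")" else kn.1

-- absolute boundary indices of new runs within a suffix, prev element given
def pvAB (prev : String) (k : Nat) : List String → List Nat
  | [] => []
  | x :: xs => if x = prev then pvAB x (k + 1) xs else k :: pvAB x (k + 1) xs

lemma pv_loop (xs : List String) (k : String) (acc : List String) (t : Int) :
    pvFlushA (xs.foldl pvStepA (some k, acc, t)) =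
      acc ++ (pvRunsAux k t xs).map pvG := by
  induction xs generalizing k acc t with
  | nil => simp [pvFlushA, pvRunsAux, pvG]
  | cons x xs ih =>
      by_cases h : x = k
      · subst h
        simp [List.foldl_cons, pvStepA, pvRunsAux, ih]
      · simp [List.foldl_cons, pvStepA, pvRunsAux, Ne.symm h, h, ih, pvG]

lemma pv_filter_ab (xs : List String) (p : String) (k : Nat) :
    ((List.range xs.length).filter
        (fun i => xs.getD i "" != (p :: xs).getD i "")).map (· + k) = pvAB p k xs := by
  induction xs generalizing p k with
  | nil => simp [pvAB]
  | cons y ys ih =>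
      have hcomp : ((fun x => x + k) ∘ Nat.succ) = (fun x => x + (k + 1)) := by
        funext i; simp [Function.comp]; omega
      have hpred : List.filter
          ((fun i => (y :: ys).getD i "" != (p :: y :: ys).getD i "") ∘ Nat.succ)
          (List.range ys.length)
          = List.filter (fun i => ys.getD i "" != (y :: ys).getD i "")
              (List.range ys.length) := by
        apply List.filter_congr; intro i _
        simp [Function.comp]
      simp only [List.length_cons, List.range_succ_eq_map, List.filter_cons,
        List.filter_map, hpred, pvAB]
      by_cases h : y = p
      · subst h
        simp only [List.getD_cons_zero, bne_self_eq_false, Bool.false_eq_true, if_false,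
          List.map_map, hcomp, ih]
        simp
      · have hb : ((y :: ys).getD 0 "" != (p :: y :: ys).getD 0 "") = true := by
          simp [bne_iff_ne, h]
        simp only [hb, if_true, List.map_cons, List.map_map, hcomp, ih, h, if_false,
          Nat.zero_add]

lemma pv_bpieces (xs : List String) (parts : List String) (p : String) (s t : Nat)
    (hget : parts.getD s "" = p)
    (hdrop : parts.drop (s + t) = xs)
    (hlen : parts.length = s + t + xs.length) :
    (((s :: (pvAB p (s + t) xs ++ [parts.length])).zip
        (pvAB p (s + t) xs ++ [parts.length])).map (pvPieceB parts))
      = (pvRunsAux p (t : Int) xs).map pvG := by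
  induction xs generalizing p s t with
  | nil =>
      have hL : parts.length = s + t := by simpa using hlen
      have harith : ((parts.length : Int) - (s : Int)) = (t : Int) := by
        rw [hL]; push_cast; ring
      simp only [pvAB, List.nil_append, List.zip_cons_cons, List.zip_nil_right,
        List.map_cons, List.map_nil, pvRunsAux, pvPieceB, harith, hget, pvG]
  | cons y ys ih =>
      have hdrop' : parts.drop (s + t + 1) = ys := by
        have := congrArg List.tail hdrop
        simpa [List.tail_drop] using this
      by_cases h : y = p
      · subst h
        have hcast : ((t : Int) + 1) = (((t + 1 : Nat)) : Int) := by push_cast; ring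
        have hrw : pvRunsAux y (t : Int) (y :: ys) = pvRunsAux y (((t + 1 : Nat)) : Int) ys := by
          simp only [pvRunsAux, if_true]
          rw [hcast]
        rw [hrw]
        have hab : pvAB y (s + t) (y :: ys) = pvAB y (s + t + 1) ys := by
          simp only [pvAB]
          simp
        have := ih y s (t + 1) hget (by simpa [Nat.add_assoc] using hdrop')
          (by simp at hlen ⊢; omega)
        rw [hab]
        exact this
      · have hgety : parts.getD (s + t) "" = y := by
          have h0 : parts[s + t]? = some y := by
            have := congrArg (fun l => l[0]?) hdrop
            simpa [List.getElem?_drop] using this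
          simp [List.getD, h0]
        have harith : (((s + t : Nat)) : Int) - (s : Int) = (t : Int) := by push_cast; ring
        simp only [pvAB, h, if_false, List.cons_append, List.zip_cons_cons,
          List.map_cons, pvRunsAux, pvG]
        congr 1
        · have hget' : parts[s]?.getD "" = p := by simpa [List.getD] using hget
          simp [pvPieceB, hget']
        · have := ih y (s + t) 1 hgety (by simpa [Nat.add_assoc] using hdrop')
            (by simp at hlen ⊢; omega)
          simpa [Nat.add_assoc] using this

lemma pv_bounds_head (p : String) (xs : List String) :
    (List.range (p :: xs).length).filter
        (fun i => i == 0 || (p :: xs).getD i "" != (p :: xs).getD (i - 1) "")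
      = 0 :: pvAB p 1 xs := by
  have hsucc : (Nat.succ = fun x => x + 1) := by funext i; omega
  have hpred : List.filter
      ((fun i => i == 0 || (p :: xs).getD i "" != (p :: xs).getD (i - 1) "") ∘ Nat.succ)
      (List.range xs.length)
      = List.filter (fun i => xs.getD i "" != (p :: xs).getD i "")
          (List.range xs.length) := by
    apply List.filter_congr; intro i _
    simp [Function.comp]
  simp only [List.length_cons, List.range_succ_eq_map, List.filter_cons,
    List.filter_map, hpred, beq_self_eq_true, Bool.true_or, if_true]
  rw [← pv_filter_ab xs p 1, hsucc]

-- ===== VERDICT =====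
theorem merge_per_node_spec_py_spec : Claim_equal_merge_per_node_spec_py := by
  intro s _
  unfold Spec_merge_per_node_spec_py merge_per_node_spec_py merge_per_node_spec_py_alt
  cases hp : (PySem.Str.split? s ",").getD [] with
  | nil => simp [pvFlushA]
  | cons x xs =>
      simp only [List.foldl_cons, pvStepA, pv_loop, List.nil_append, pv_bounds_head]
      rw [List.cons_append, List.tail_cons]
      have := pv_bpieces xs (x :: xs) x 0 1 (by simp) (by simp)
        (by simp [Nat.add_comm])
      simp only [Nat.zero_add, Nat.cast_one] at this
      rw [this]
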